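-- pv_equiv track=rewrite | github.com/JipSchoneveld/Master-Thesis | annotation_processing/annotation_tasks.py | _i2spans
-- ===== SOURCE A (Python) =====
-- def _i2spans(indices: set[int]) -> list[tuple[int, int]]:
--     """
--     converts a set of indices to a list of spans that cover the all indices
--     """
--     sorted_indices = sorted(list(indices))
--     spans = []
--
--     start = sorted_indices[0]
--     for i in range(1, len(sorted_indices)):
--         if (sorted_indices[i] - sorted_indices[i-1] > 1):
--             spans.append((start, sorted_indices[i-1] + 1)) #add 1 to make it a proper range
--             start = sorted_indices[i]
--     spans.append((start, sorted_indices[-1] + 1)) #last value for start is the starts value of the final span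
--
--     return spans
-- ===== SOURCE B (Python) =====
-- def _i2spans(indices: set[int]) -> list[tuple[int, int]]:
--     """
--     converts a set of indices to a list of spans that cover the all indices
--     """
--     s = set(indices)
--     starts = sorted(v for v in s if v - 1 not in s)
--     ends = sorted(v for v in s if v + 1 not in s)
--     return [(a, b + 1) for a, b in zip(starts, ends)]
-- ===== Notes on version B (the rewrite author's own statement) =====
-- stated objective: alternative
-- what changed: B derives the spans from run boundaries - a value v starts a span iff v-1 is not in the set and ends one iff v+1 is not in the set - sorting and zipping the two boundary lists, instead of A's single scan over the sorted list comparing each element with its predecessor while carrying start/prev registers.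
import Mathlib
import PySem

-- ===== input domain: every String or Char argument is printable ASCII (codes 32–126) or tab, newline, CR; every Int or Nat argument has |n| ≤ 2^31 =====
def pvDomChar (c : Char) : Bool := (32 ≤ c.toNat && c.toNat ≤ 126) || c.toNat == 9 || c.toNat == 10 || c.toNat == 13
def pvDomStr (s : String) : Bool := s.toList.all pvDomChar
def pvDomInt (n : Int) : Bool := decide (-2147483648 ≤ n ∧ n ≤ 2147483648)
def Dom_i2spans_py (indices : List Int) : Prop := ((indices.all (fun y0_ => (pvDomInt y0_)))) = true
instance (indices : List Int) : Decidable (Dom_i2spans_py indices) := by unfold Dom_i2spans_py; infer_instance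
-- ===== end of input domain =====

-- B rebuilds the spans from run boundaries (set membership of v-1 / v+1) instead of A's
-- neighbour-difference scan with start/prev registers; alternative algorithm, same cost.

-- ===== PORT A =====
def i2spans_py (indices : List Int) : List (Int × Int) :=
  let L := PySem.List.sorted indices (fun x => x) false
  let start := PySem.List.pyGetD L 0 0   -- sorted_indices[0]; IndexError on empty set excluded by Pre_
  let st := (PySem.List.pyRange 1 (L.length : Int) 1).foldl
      (fun (acc : List (Int × Int) × Int) i =>
        if PySem.List.pyGetD L i 0 - PySem.List.pyGetD L (i - 1) 0 > 1 then
          (acc.1 ++ [(acc.2, PySem.List.pyGetD L (i - 1) 0 + 1)], PySem.List.pyGetD L i 0)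
        else acc) ([], start)
  st.1 ++ [(st.2, PySem.List.pyGetD L (-1) 0 + 1)]

-- ===== PORT B =====
def i2spans_py_alt (indices : List Int) : List (Int × Int) :=
  let s := PySem.Set.ofList indices
  let starts := PySem.List.sorted (s.filter (fun v => !decide ((v - 1) ∈ s))) (fun x => x) false
  let ends := PySem.List.sorted (s.filter (fun v => !decide ((v + 1) ∈ s))) (fun x => x) false
  (starts.zip ends).map (fun p => (p.1, p.2 + 1))

-- ===== PRECONDITION & SPEC =====
-- Pre_ excludes only the empty set, on which A raises IndexError (sorted_indices[0]).
def Pre_i2spans_py (indices : List Int) : Prop := indices ≠ []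
instance (indices : List Int) : Decidable (Pre_i2spans_py indices) := by unfold Pre_i2spans_py; infer_instance
def pvWitness_i2spans_py : List Int := [1, 2, 5]

def Spec_i2spans_py (indices : List Int) (out : List (Int × Int)) : Prop := out = i2spans_py_alt indices
instance (indices : List Int) (out : List (Int × Int)) : Decidable (Spec_i2spans_py indices out) := by unfold Spec_i2spans_py; infer_instance

-- ===== CLAIM (what is proved, stated in full; the proofs are below) =====
def Claim_equal_i2spans_py : Prop := ∀ (indices : List Int), Dom_i2spans_py indices → Pre_i2spans_py indices → Spec_i2spans_py indices (i2spans_py indices)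

-- ===== LEMMAS AND PROOFS =====

-- canonical recursion both ports are reduced to: walk the tail with (start, prev) registers
def go2 (start prev : Int) : List Int → List (Int × Int)
  | [] => [(start, prev + 1)]
  | y :: ys => if y - prev > 1 then (start, prev + 1) :: go2 y y ys else go2 start y ys

-- ---- A side ----
-- A's loop state as structural recursion over the tail of the sorted list
def goA (spans : List (Int × Int)) (start prev : Int) : List Int → List (Int × Int) × Int
  | [] => (spans, start)
  | y :: ys => if y - prev > 1 then goA (spans ++ [(start, prev + 1)]) y y ys else goA spans start y ys

theorem pyGetD_neg_one (x : Int) (xs : List Int) (d : Int) :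
    PySem.List.pyGetD (x :: xs) (-1) d = xs.getLastD x := by
  simp only [PySem.List.pyGetD, PySem.List.pyGet?, PySem.List.pyIdx?, Int.reduceNeg, Int.neg_nonneg,
    Int.reduceLE, ↓reduceIte, List.length_cons, Nat.cast_add, Nat.cast_one, neg_add_rev, add_le_iff_nonpos_right,
    Left.neg_nonpos_iff, Nat.cast_nonneg, neg_neg, Int.toNat_one, add_tsub_cancel_right, Option.bind_some,
    lt_add_iff_pos_right, Order.lt_one_iff, getElem?_pos, Option.getD_some]
  have h1 := List.getLast_eq_getElem (l := x :: xs) (by simp)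
  simp only [List.length_cons, Nat.add_sub_cancel] at h1
  exact h1.symm.trans (by rw [List.getLast_eq_getLastD])

theorem fold_eq_goA (L : List Int) : ∀ (m k : Nat), L.length = k + 1 + m →
    ∀ spans start,
    (PySem.List.pyRange ((k : Int) + 1) (L.length : Int) 1).foldl
      (fun (acc : List (Int × Int) × Int) i =>
        if PySem.List.pyGetD L i 0 - PySem.List.pyGetD L (i - 1) 0 > 1 then
          (acc.1 ++ [(acc.2, PySem.List.pyGetD L (i - 1) 0 + 1)], PySem.List.pyGetD L i 0)
        else acc) (spans, start)
    = goA spans start (L.getD k 0) (L.drop (k + 1)) := by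
  intro m
  induction m with
  | zero =>
    intro k hk spans start
    rw [PySem.List.pyRange_one_eq_nil (by omega)]
    rw [List.drop_of_length_le (by omega)]
    rfl
  | succ m ih =>
    intro k hk spans start
    have hklt : k + 1 < L.length := by omega
    rw [PySem.List.pyRange_one_cons (by exact_mod_cast by omega : ((k:Int)+1) < (L.length : Int))]
    rw [List.foldl_cons]
    have e1 : ((k : Int) + 1) - 1 = ((k : Nat) : Int) := by ring
    have e2 : ((k : Int) + 1) = (((k + 1 : Nat) : Nat) : Int) := by push_cast; ring
    have hdrop : L.drop (k + 1) = L[k+1]'hklt :: L.drop (k + 2) := List.drop_eq_getElem_cons hklt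
    have hg1 : PySem.List.pyGetD L ((k : Int) + 1) 0 = L[k+1]'hklt := by
      rw [e2, PySem.List.pyGetD_natCast, List.getD_eq_getElem _ _ hklt]
    have hg0 : PySem.List.pyGetD L (((k : Int) + 1) - 1) 0 = L.getD k 0 := by
      rw [e1, PySem.List.pyGetD_natCast]
    rw [hdrop]
    show _ = goA spans start (L.getD k 0) (L[k+1]'hklt :: L.drop (k + 2))
    rw [goA]
    by_cases hcond : L[k+1]'hklt - L.getD k 0 > 1
    · rw [if_pos (by rw [hg1, hg0]; exact hcond), if_pos hcond]
      have := ih (k+1) (by omega) (spans ++ [(start, L.getD k 0 + 1)]) (L[k+1]'hklt)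
      rw [hg1, hg0]
      have ecast : (((k+1 : Nat) : Int) + 1) = ((k : Int) + 1) + 1 := by push_cast; ring
      rw [← ecast]
      rw [this]
      congr 1
      · rw [List.getD_eq_getElem _ _ hklt]
    · rw [if_neg (by rw [hg1, hg0]; exact hcond), if_neg hcond]
      have := ih (k+1) (by omega) spans start
      have ecast : (((k+1 : Nat) : Int) + 1) = ((k : Int) + 1) + 1 := by push_cast; ring
      rw [← ecast, this]
      congr 1
      rw [List.getD_eq_getElem _ _ hklt]

theorem goA_go2 (ys : List Int) : ∀ spans start prev,
    (goA spans start prev ys).1 ++ [((goA spans start prev ys).2, (ys.getLastD prev) + 1)]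
    = spans ++ go2 start prev ys := by
  induction ys with
  | nil => intro spans start prev; simp [goA, go2]
  | cons y ys ih =>
    intro spans start prev
    by_cases h : y - prev > 1
    · simp only [goA, go2, h, List.getLastD_cons, if_pos]
      rw [ih]; simp
    · simp only [goA, go2, h, List.getLastD_cons, if_neg, not_false_iff]
      rw [ih]

theorem A_eq_go2 (indices : List Int) (x : Int) (xs : List Int)
    (h : PySem.List.sorted indices (fun x => x) false = x :: xs) :
    i2spans_py indices = go2 x x xs := by
  unfold i2spans_py
  rw [h]
  have hfold := fold_eq_goA (x :: xs) xs.length 0 (by simp [Nat.add_comm]) [] (PySem.List.pyGetD (x :: xs) 0 0)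
  have hz : PySem.List.pyGetD (x :: xs) 0 0 = x := by
    rw [show (0 : Int) = ((0 : Nat) : Int) from rfl, PySem.List.pyGetD_natCast]; rfl
  simp only [Nat.cast_zero, zero_add, List.getD_eq_getElem?_getD, List.length_cons] at hfold
  simp only [hz] at hfold ⊢
  rw [show ((xs.length + 1 : Nat) : Int) = ((x :: xs).length : Int) from by simp] at hfold
  rw [hfold]
  have hx0 : (x :: xs)[0]?.getD 0 = x := rfl
  rw [hx0, List.drop_one, List.tail_cons, pyGetD_neg_one]
  have := goA_go2 xs [] x x
  simpa using this

-- ---- dedup bridge: A walks the sorted list with duplicates, B the sorted set ----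
def dd (prev : Int) : List Int → List Int
  | [] => []
  | y :: ys => if y = prev then dd prev ys else y :: dd y ys

theorem mem_dd_fwd (a : Int) : ∀ (xs : List Int) (prev : Int), a ∈ dd prev xs → a ∈ xs ∨ a = prev := by
  intro xs
  induction xs with
  | nil => intro prev h; exact absurd h (by simp [dd])
  | cons y ys ih =>
    intro prev h
    by_cases hy : y = prev
    · subst hy
      rcases ih y (by simpa [dd] using h) with h1 | h1 <;> simp [h1]
    · rw [dd, if_neg hy] at h
      rcases List.mem_cons.1 h with rfl | h1
      · simp
      · rcases ih y h1 with h2 | h2 <;> simp [h2]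

theorem mem_dd_bwd (a : Int) : ∀ (xs : List Int) (prev : Int), a ∈ xs → a ∈ dd prev xs ∨ a = prev := by
  intro xs
  induction xs with
  | nil => intro prev h; exact absurd h (by simp)
  | cons y ys ih =>
    intro prev h
    by_cases hy : y = prev
    · subst hy
      rcases List.mem_cons.1 h with rfl | h1
      · right; rfl
      · rw [dd, if_pos rfl]; exact ih y h1
    · rw [dd, if_neg hy]
      rcases List.mem_cons.1 h with rfl | h1
      · left; simp
      · rcases ih y h1 with h2 | h2
        · left; exact List.mem_cons_of_mem _ h2
        · left; simp [h2]

theorem pairwise_dd : ∀ (xs : List Int) (prev : Int),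
    List.Pairwise (· ≤ ·) (prev :: xs) → List.Pairwise (· < ·) (prev :: dd prev xs) := by
  intro xs
  induction xs with
  | nil => intro prev _; simp [dd]
  | cons y ys ih =>
    intro prev h
    by_cases hy : y = prev
    · subst hy
      rw [dd, if_pos rfl]
      exact ih y (h.sublist (List.cons_sublist_cons.2 (List.sublist_cons_self _ _)))
    · rw [dd, if_neg hy]
      have h1 : ∀ a ∈ y :: ys, prev ≤ a := (List.pairwise_cons.1 h).1
      have h2 : List.Pairwise (· ≤ ·) (y :: ys) := (List.pairwise_cons.1 h).2
      have hpy : prev < y := lt_of_le_of_ne (h1 y (by simp)) (Ne.symm hy)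
      have hyle : ∀ a ∈ ys, y ≤ a := (List.pairwise_cons.1 h2).1
      have hrec := ih y h2
      refine List.pairwise_cons.2 ⟨?_, hrec⟩
      intro a ha
      rcases List.mem_cons.1 ha with rfl | ha
      · exact hpy
      · rcases mem_dd_fwd a ys y ha with h3 | h3
        · exact lt_of_lt_of_le hpy (hyle a h3)
        · exact h3 ▸ hpy

theorem go2_dd : ∀ (xs : List Int) (start prev : Int), go2 start prev xs = go2 start prev (dd prev xs) := by
  intro xs
  induction xs with
  | nil => intro _ _; rfl
  | cons y ys ih =>
    intro start prev
    by_cases h : y = prev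
    · subst h; simp only [dd, go2]
      have : ¬ (y - y > 1) := by omega
      rw [if_neg this]; exact ih start y
    · simp only [dd, if_neg h, go2]; by_cases hg : y - prev > 1 <;> simp [hg, ih]

theorem S_eq_dd (indices : List Int) (x : Int) (xs : List Int)
    (h : PySem.List.sorted indices (fun x => x) false = x :: xs) :
    PySem.List.sorted (PySem.Set.ofList indices) (fun x => x) false = x :: dd x xs := by
  have hle : List.Pairwise (· ≤ ·) (x :: xs) := by
    have := PySem.List.sorted_pairwise indices (fun x => x)
    rw [h] at this; exact this
  have hlt : List.Pairwise (· < ·) (x :: dd x xs) := pairwise_dd xs x hle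
  apply PySem.List.sorted_eq_of_perm_of_pairwise_lt
  · rw [List.perm_ext_iff_of_nodup (hlt.imp ne_of_lt) (PySem.Set.nodup_ofList indices)]
    intro a
    rw [PySem.Set.mem_ofList]
    have hmem : a ∈ indices ↔ a ∈ x :: xs := by
      rw [← PySem.List.mem_sorted indices (fun x => x) false a, h]
    rw [hmem]
    simp only [List.mem_cons]
    constructor
    · rintro (rfl | ha)
      · left; rfl
      · rcases mem_dd_fwd a xs x ha with h1 | h1
        · right; exact h1
        · left; exact h1
    · rintro (rfl | ha)
      · left; rfl
      · rcases mem_dd_bwd a xs x ha with h1 | h1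
        · right; exact h1
        · left; exact h1
  · exact hlt

-- ---- B side ----
def gstarts (prev : Int) : List Int → List Int
  | [] => []
  | y :: ys => if y - prev > 1 then y :: gstarts y ys else gstarts y ys

def gends : List Int → List Int
  | [] => []
  | [x] => [x]
  | x :: y :: ys => if y - x > 1 then x :: gends (y :: ys) else gends (y :: ys)

theorem filter_starts_aux : ∀ (xs : List Int) (x : Int), List.Pairwise (· < ·) (x :: xs) →
    xs.filter (fun v => !decide ((v - 1) ∈ (x :: xs))) = gstarts x xs := by
  intro xs
  induction xs with
  | nil => intro x _; rfl
  | cons y ys ih =>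
    intro x h
    have hxy : x < y := (List.pairwise_cons.1 h).1 y (by simp)
    have hyys : ∀ a ∈ ys, y < a := (List.pairwise_cons.1 (List.pairwise_cons.1 h).2).1
    have htail : ys.filter (fun v => !decide ((v - 1) ∈ (x :: y :: ys)))
        = ys.filter (fun v => !decide ((v - 1) ∈ (y :: ys))) := by
      apply List.filter_congr
      intro v hv
      have : y < v := hyys v hv
      simp only [List.mem_cons]
      have hne : ¬ (v - 1 = x) := by omega
      simp [hne]
    have hrec := ih y (List.pairwise_cons.1 h).2
    by_cases hg : y - x > 1
    · have hkept : (y - 1 ∈ (x :: y :: ys)) = False := by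
        simp only [List.mem_cons, eq_iff_iff, iff_false]
        push Not
        exact ⟨by omega, by omega, fun hmem => by have := hyys _ hmem; omega⟩
      rw [show gstarts x (y :: ys) = y :: gstarts y ys from by rw [gstarts, if_pos hg]]
      rw [List.filter_cons, if_pos (by simp [hkept]), htail, hrec]
    · have hin : (y - 1) ∈ (x :: y :: ys) := by
        have : y - 1 = x := by omega
        simp [this]
      rw [show gstarts x (y :: ys) = gstarts y ys from by rw [gstarts, if_neg hg]]
      rw [List.filter_cons, if_neg (by simp [hin]), htail, hrec]

theorem filter_ends : ∀ (S : List Int), List.Pairwise (· < ·) S →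
    S.filter (fun v => !decide ((v + 1) ∈ S)) = gends S := by
  intro S
  induction S with
  | nil => intro _; rfl
  | cons x xs ih =>
    intro h
    match xs, ih with
    | [], _ =>
      have : (!decide (x + 1 ∈ [x])) = true := by simp
      simp only [gends, List.filter, this]
    | y :: ys, ih =>
      have hxy : x < y := (List.pairwise_cons.1 h).1 y (by simp)
      have hyys : ∀ a ∈ ys, y < a := (List.pairwise_cons.1 (List.pairwise_cons.1 h).2).1
      have htail : (y :: ys).filter (fun v => !decide ((v + 1) ∈ (x :: y :: ys)))
          = (y :: ys).filter (fun v => !decide ((v + 1) ∈ (y :: ys))) := by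
        apply List.filter_congr
        intro v hv
        have : y ≤ v := by rcases List.mem_cons.1 hv with rfl | hv; omega; exact le_of_lt (hyys v hv)
        have hne : ¬ (v + 1 = x) := by omega
        simp only [List.mem_cons]
        simp [hne]
      have hrec := ih (List.pairwise_cons.1 h).2
      by_cases hg : y - x > 1
      · have hkept : (x + 1 ∈ (x :: y :: ys)) = False := by
          simp only [List.mem_cons, eq_iff_iff, iff_false]
          push Not
          exact ⟨by omega, by omega, fun hmem => by have := hyys _ hmem; omega⟩
        rw [show gends (x :: y :: ys) = x :: gends (y :: ys) from by rw [gends, if_pos hg]]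
        rw [List.filter_cons, if_pos (by simp [hkept]), htail, hrec]
      · have hin : (x + 1) ∈ (x :: y :: ys) := by
          have : x + 1 = y := by omega
          simp [this]
        rw [show gends (x :: y :: ys) = gends (y :: ys) from by rw [gends, if_neg hg]]
        rw [List.filter_cons, if_neg (by simp [hin]), htail, hrec]

theorem zip_eq_go2 : ∀ (ys : List Int) (start prev : Int),
    ((start :: gstarts prev ys).zip (gends (prev :: ys))).map (fun p => (p.1, p.2 + 1))
    = go2 start prev ys := by
  intro ys
  induction ys with
  | nil => intro start prev; simp [gstarts, gends, go2]
  | cons y ys ih =>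
    intro start prev
    by_cases h : y - prev > 1
    · simp only [gstarts, gends, go2, h, ite_true, List.zip_cons_cons, List.map_cons]
      exact congrArg _ (ih y y)
    · simp only [gstarts, gends, go2, h, ite_false]
      exact ih start y

theorem B_eq_go2 (indices : List Int) (x : Int) (xs : List Int)
    (h : PySem.List.sorted (PySem.Set.ofList indices) (fun x => x) false = x :: xs) :
    i2spans_py_alt indices = go2 x x xs := by
  show (((PySem.List.sorted ((PySem.Set.ofList indices).filter (fun v => !decide ((v - 1) ∈ PySem.Set.ofList indices))) (fun x => x) false).zip
      (PySem.List.sorted ((PySem.Set.ofList indices).filter (fun v => !decide ((v + 1) ∈ PySem.Set.ofList indices))) (fun x => x) false)).map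
      (fun p => (p.1, p.2 + 1))) = go2 x x xs
  have hlt : List.Pairwise (· < ·) (x :: xs) := by
    have := PySem.List.sorted_ofList_pairwise_lt indices
    rw [h] at this; exact this
  have hperm := PySem.List.sorted_perm (PySem.Set.ofList indices) (fun x => x) false
  rw [h] at hperm
  have hsortfilter : ∀ (p : Int → Bool),
      PySem.List.sorted ((PySem.Set.ofList indices).filter p) (fun x => x) false = (x :: xs).filter p := by
    intro p
    exact PySem.List.sorted_eq_of_perm_of_pairwise_lt _ _ _ (hperm.filter p) (hlt.filter p)
  have hmemcongr : ∀ (v : Int), (v ∈ PySem.Set.ofList indices) ↔ (v ∈ x :: xs) := by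
    intro v
    rw [← PySem.List.mem_sorted (PySem.Set.ofList indices) (fun x => x) false v, h]
  have hs : ((PySem.Set.ofList indices).filter (fun v => !decide ((v - 1) ∈ PySem.Set.ofList indices)))
      = ((PySem.Set.ofList indices).filter (fun v => !decide ((v - 1) ∈ (x :: xs)))) := by
    apply List.filter_congr; intro v _; simp [hmemcongr]
  have he : ((PySem.Set.ofList indices).filter (fun v => !decide ((v + 1) ∈ PySem.Set.ofList indices)))
      = ((PySem.Set.ofList indices).filter (fun v => !decide ((v + 1) ∈ (x :: xs)))) := by
    apply List.filter_congr; intro v _; simp [hmemcongr]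
  rw [hs, he, hsortfilter, hsortfilter]
  rw [show (x :: xs).filter (fun v => !decide ((v - 1) ∈ (x :: xs)))
        = x :: gstarts x xs from by
      rw [List.filter_cons, if_pos ?_, filter_starts_aux xs x hlt]
      have hall : ∀ a ∈ xs, x < a := (List.pairwise_cons.1 hlt).1
      simp only [List.mem_cons, Bool.not_eq_eq_eq_not, Bool.not_true, decide_eq_false_iff_not]
      push Not
      exact ⟨by omega, fun hmem => by have := hall _ hmem; omega⟩]
  rw [filter_ends (x :: xs) hlt]
  exact zip_eq_go2 xs x x

-- ===== VERDICT (by name: the statement is the Claim_ definition above) =====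
theorem i2spans_py_spec : Claim_equal_i2spans_py := by
  intro indices _ hpre
  unfold Spec_i2spans_py
  rcases hL : PySem.List.sorted indices (fun x => x) false with _ | ⟨x, xs⟩
  · exact absurd ((PySem.List.sorted_eq_nil_iff indices _ false).1 hL) hpre
  · rw [A_eq_go2 indices x xs hL, B_eq_go2 indices x (dd x xs) (S_eq_dd indices x xs hL), go2_dd]
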